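-- pv_equiv track=rewrite | github.com/antman1935/stirling-to-type-b | StirlingPermutations.py | getInsertionPoints
-- ===== SOURCE A (Python) =====
-- def getDescents(perm):
--     descents = []
--     for i in range(len(perm)-1):
--         if perm[i] > perm[i+1]:
--             descents.append(i)
--     return descents
--
-- def getInsertionPoints(perm):
--     insertion_indices = []
--     descent = getDescents(perm)
--     descent_index = 0 # stays at the next descent coming after position j
--     for j in range(len(perm)):
--         # if there is a descent here, you can insert ii
--         if descent and descent_index < len(descent) and descent[descent_index] == j:
--             insertion_indices.append(j)
--             descent_index += 1
--         # if there is a weak ascent and no more descents, you can insert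
--         elif not descent or len(descent) <= descent_index:
--             insertion_indices.append(j)
--         elif j != len(perm)-1 and len(descent) > descent_index:
--         # if there is a weak ascent and the next character after this is
--         # <= the leading term of the next run, then you can insert
--             next_char = perm[j+1]
--             next_leading_term = perm[descent[descent_index] + 1]
--             if next_char <= next_leading_term:
--                 insertion_indices.append(j)
--     return insertion_indices
-- ===== SOURCE B (Python) =====
-- # Simpler: single reverse pass maintaining (has-next-descent, next-run-lead);
-- # no separate descents list, no forward pointer.
-- def getInsertionPoints(perm):
--     n = len(perm)
--     out = []
--     hasD = False
--     lead = 0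
--     for j in range(n - 1, -1, -1):
--         isD = j < n - 1 and perm[j] > perm[j + 1]
--         if isD or not hasD or perm[j + 1] <= lead:
--             out.append(j)
--         if isD:
--             hasD = True
--             lead = perm[j + 1]
--     out.reverse()
--     return out
-- ===== Notes on version B (the rewrite author's own statement) =====
-- stated objective: simpler
-- what changed: Replaces the precomputed descents list and the forward descent-index pointer with a single right-to-left pass that maintains just a boolean (a descent lies ahead) and the lead element of the next run, reversing the collected list at the end.
import Mathlib
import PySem

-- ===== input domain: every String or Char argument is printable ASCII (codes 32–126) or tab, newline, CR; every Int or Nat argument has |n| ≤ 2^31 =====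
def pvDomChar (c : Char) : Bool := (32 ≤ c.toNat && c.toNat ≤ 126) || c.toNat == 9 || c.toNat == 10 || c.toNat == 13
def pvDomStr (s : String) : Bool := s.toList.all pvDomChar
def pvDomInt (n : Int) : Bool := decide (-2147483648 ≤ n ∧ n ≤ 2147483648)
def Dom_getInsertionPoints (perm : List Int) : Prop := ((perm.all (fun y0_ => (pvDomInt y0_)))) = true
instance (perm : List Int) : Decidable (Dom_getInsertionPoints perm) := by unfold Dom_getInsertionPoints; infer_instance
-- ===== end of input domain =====

-- B replaces A's precomputed descents list + forward index pointer with one right-to-left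
-- pass maintaining a boolean (a descent lies ahead) and the next run's lead element
-- (objective: simpler; same value on every input).

-- ===== PORT A =====
def getDescents (perm : List Int) : List Int :=
  (PySem.List.pyRange 0 ((perm.length : Int) - 1) 1).foldl
    (fun descents i =>
      if PySem.List.pyGetD perm i 0 > PySem.List.pyGetD perm (i + 1) 0
      then descents ++ [i] else descents) []

def pvStepA (perm descent : List Int) (st : List Int × Int) (j : Int) : List Int × Int :=
  if !descent.isEmpty && decide (st.2 < (descent.length : Int)) &&
      (PySem.List.pyGetD descent st.2 0 == j)
  then (st.1 ++ [j], st.2 + 1)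
  else if descent.isEmpty || decide ((descent.length : Int) ≤ st.2)
  then (st.1 ++ [j], st.2)
  else if decide (j ≠ (perm.length : Int) - 1) && decide ((descent.length : Int) > st.2)
  then (if PySem.List.pyGetD perm (j + 1) 0 ≤
          PySem.List.pyGetD perm (PySem.List.pyGetD descent st.2 0 + 1) 0
        then (st.1 ++ [j], st.2) else st)
  else st

def getInsertionPoints (perm : List Int) : List Int :=
  ((PySem.List.pyRange 0 (perm.length : Int) 1).foldl
    (pvStepA perm (getDescents perm)) ([], 0)).1

-- ===== PORT B =====
def pvStepB (perm : List Int) (st : List Int × Bool × Int) (j : Int) : List Int × Bool × Int :=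
  let n : Int := perm.length
  let isD := decide (j < n - 1) &&
    decide (PySem.List.pyGetD perm j 0 > PySem.List.pyGetD perm (j + 1) 0)
  let res := if isD || !st.2.1 || decide (PySem.List.pyGetD perm (j + 1) 0 ≤ st.2.2)
             then st.1 ++ [j] else st.1
  if isD then (res, true, PySem.List.pyGetD perm (j + 1) 0)
  else (res, st.2.1, st.2.2)

def getInsertionPoints_alt (perm : List Int) : List Int :=
  (((PySem.List.pyRange ((perm.length : Int) - 1) (-1) (-1)).foldl (pvStepB perm)
    ([], false, 0)).1).reverse

-- ===== PRECONDITION & SPEC =====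
def Spec_getInsertionPoints (perm : List Int) (out : List Int) : Prop := out = getInsertionPoints_alt perm
instance (perm : List Int) (out : List Int) : Decidable (Spec_getInsertionPoints perm out) := by unfold Spec_getInsertionPoints; infer_instance

-- ===== CLAIM (what is proved, stated in full; the proofs are below) =====
def Claim_equal_getInsertionPoints : Prop := ∀ (perm : List Int), Dom_getInsertionPoints perm → Spec_getInsertionPoints perm (getInsertionPoints perm)

-- ===== LEMMAS AND PROOFS =====
def pvLead : List Int → Option Int
  | x :: y :: r => if x > y then some y else pvLead (y :: r)
  | _ => none

def pvOk (perm : List Int) (j : Nat) : Bool :=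
  if j + 1 < perm.length then
    decide (perm.getD j 0 > perm.getD (j + 1) 0) ||
      (match pvLead (perm.drop (j + 1)) with
       | none => true
       | some m => decide (perm.getD (j + 1) 0 ≤ m))
  else true

theorem pvLead_cons_cons (x y : Int) (r : List Int) :
    pvLead (x :: y :: r) = if y < x then some y else pvLead (y :: r) := rfl

theorem pv_drop_cons (perm : List Int) (a : Nat) (h : a < perm.length) :
    perm.drop a = perm.getD a 0 :: perm.drop (a + 1) := by
  rw [List.drop_eq_getElem_cons h, List.getD_eq_getElem _ _ h]

theorem pv_D_eq (perm : List Int) :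
    getDescents perm =
      (PySem.List.pyRange 0 ((perm.length : Int) - 1) 1).filter
        (fun i => decide (PySem.List.pyGetD perm (i + 1) 0 < PySem.List.pyGetD perm i 0)) := by
  unfold getDescents
  rw [PySem.List.foldl_append_ite_eq_filter]
  simp

theorem pv_D_pairwise (perm : List Int) : (getDescents perm).Pairwise (· < ·) := by
  rw [pv_D_eq]
  exact (PySem.List.pairwise_lt_pyRange_one _ _).filter _

theorem pv_mem_D (perm : List Int) (d : Int) :
    d ∈ getDescents perm ↔
      0 ≤ d ∧ d < (perm.length : Int) - 1 ∧
        PySem.List.pyGetD perm (d + 1) 0 < PySem.List.pyGetD perm d 0 := by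
  rw [pv_D_eq]
  simp [List.mem_filter, PySem.List.mem_pyRange_one, and_assoc]

theorem pv_head_sorted (l : List Int) (a : Int) (hp : l.Pairwise (· < ·))
    (hm : a ∈ l) (hall : ∀ b ∈ l, a ≤ b) : l.head? = some a := by
  cases l with
  | nil => cases hm
  | cons x xs =>
    rcases List.mem_cons.mp hm with rfl | hx
    · rfl
    · exfalso
      have hax : x < a := (List.pairwise_cons.mp hp).1 a hx
      have := hall x (List.mem_cons_self)
      omega

theorem pv_pyGetD_toNat (perm : List Int) (d : Int) (h : 0 ≤ d) :
    PySem.List.pyGetD perm (d + 1) 0 = perm.getD (d.toNat + 1) 0 := by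
  rw [show d + 1 = ((d.toNat + 1 : Nat) : Int) by omega, PySem.List.pyGetD_natCast]

theorem pv_pyGetD_toNat' (perm : List Int) (d : Int) (h : 0 ≤ d) :
    PySem.List.pyGetD perm d 0 = perm.getD d.toNat 0 := by
  have h2 : ((d.toNat : Nat) : Int) = d := by omega
  calc PySem.List.pyGetD perm d 0
      = PySem.List.pyGetD perm ((d.toNat : Nat) : Int) 0 := by rw [h2]
    _ = perm.getD d.toNat 0 := PySem.List.pyGetD_natCast ..

theorem pv_lead_find (perm : List Int) (k a : Nat) (hk : perm.length ≤ a + k) :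
    pvLead (perm.drop a) =
      (((getDescents perm).filter (fun d => decide ((a : Int) ≤ d))).head?).map
        (fun d => perm.getD (d.toNat + 1) 0) := by
  induction k generalizing a with
  | zero =>
    have h1 : perm.length ≤ a := by omega
    rw [List.drop_eq_nil_of_le h1]
    have hf : (getDescents perm).filter (fun d => decide ((a : Int) ≤ d)) = [] := by
      rw [List.filter_eq_nil_iff]
      intro d hd
      have := (pv_mem_D perm d).mp hd
      simp only [decide_eq_true_eq]
      omega
    rw [hf]; rfl
  | succ k ih =>
    by_cases h2 : a + 1 < perm.length
    · have hd : perm.drop a = perm.getD a 0 :: (perm.getD (a + 1) 0 :: perm.drop (a + 2)) := by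
        rw [pv_drop_cons perm a (by omega), pv_drop_cons perm (a + 1) h2]
      have hd1 : perm.drop (a + 1) = perm.getD (a + 1) 0 :: perm.drop (a + 2) :=
        pv_drop_cons perm (a + 1) h2
      rw [hd, pvLead_cons_cons]
      by_cases hD : perm.getD (a + 1) 0 < perm.getD a 0
      · rw [if_pos hD]
        have hmem : ((a : Nat) : Int) ∈ getDescents perm := by
          rw [pv_mem_D]
          refine ⟨by omega, by omega, ?_⟩
          rw [pv_pyGetD_toNat perm _ (by omega), pv_pyGetD_toNat' perm _ (by omega)]
          simpa using hD
        have hhead : ((getDescents perm).filter (fun d => decide ((a : Int) ≤ d))).head?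
            = some ((a : Nat) : Int) := by
          apply pv_head_sorted
          · exact (pv_D_pairwise perm).filter _
          · rw [List.mem_filter]; exact ⟨hmem, by simp⟩
          · intro b hb
            have := (List.mem_filter.mp hb).2
            simpa using this
        rw [hhead]
        simp
      · rw [if_neg hD, ← hd1, ih (a + 1) (by omega)]
        have hfe : (getDescents perm).filter (fun d => decide ((a : Int) ≤ d))
            = (getDescents perm).filter (fun d => decide (((a + 1 : Nat) : Int) ≤ d)) := by
          apply List.filter_congr
          intro d hd'
          have hmd := (pv_mem_D perm d).mp hd'
          by_cases hda : d = (a : Int)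
          · exfalso
            apply hD
            subst hda
            have := hmd.2.2
            rw [pv_pyGetD_toNat perm _ (by omega), pv_pyGetD_toNat' perm _ (by omega)] at this
            simpa using this
          · simp only [decide_eq_decide]
            push_cast
            omega
        rw [hfe]
    · -- a + 1 ≥ perm.length : drop a has at most one element
      have hf : (getDescents perm).filter (fun d => decide ((a : Int) ≤ d)) = [] := by
        rw [List.filter_eq_nil_iff]
        intro d hd
        have := (pv_mem_D perm d).mp hd
        simp only [decide_eq_true_eq]
        omega
      rw [hf]
      by_cases ha : a < perm.length
      · have : perm.drop a = [perm.getD a 0] := by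
          rw [pv_drop_cons perm a ha, show a + 1 = perm.length by omega, List.drop_length]
        rw [this]; rfl
      · rw [List.drop_eq_nil_of_le (by omega)]; rfl

theorem pv_stepA_eval (perm : List Int) (jn : Nat) (ins L R : List Int)
    (h : jn < perm.length)
    (hsplit : getDescents perm = L ++ R)
    (hL : ∀ d ∈ L, d < (jn : Int)) (hR : ∀ d ∈ R, (jn : Int) ≤ d) :
    ∃ L' R', getDescents perm = L' ++ R' ∧
      (∀ d ∈ L', d < ((jn + 1 : Nat) : Int)) ∧ (∀ d ∈ R', ((jn + 1 : Nat) : Int) ≤ d) ∧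
      pvStepA perm (getDescents perm) (ins, (L.length : Int)) (jn : Int)
        = ((if pvOk perm jn then ins ++ [(jn : Int)] else ins), (L'.length : Int)) := by
  have hDlen : (getDescents perm).length = L.length + R.length := by rw [hsplit]; simp
  cases R with
  | nil =>
    refine ⟨L, [], by simpa using hsplit, ?_, by simp, ?_⟩
    · intro d hd; have := hL d hd; push_cast; omega
    · have hok : pvOk perm jn = true := by
        unfold pvOk
        by_cases hj2 : jn + 1 < perm.length
        · rw [if_pos hj2]
          have hnd : ¬ (perm.getD (jn + 1) 0 < perm.getD jn 0) := by
            intro hlt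
            have hmem : ((jn : Nat) : Int) ∈ getDescents perm := by
              rw [pv_mem_D]
              refine ⟨by omega, by omega, ?_⟩
              rw [pv_pyGetD_toNat perm _ (by omega), pv_pyGetD_toNat' perm _ (by omega)]
              simpa using hlt
            rw [hsplit] at hmem
            simp only [List.append_nil] at hmem
            have := hL _ hmem
            omega
          have hlead : pvLead (perm.drop (jn + 1)) = none := by
            rw [pv_lead_find perm perm.length (jn + 1) (by omega)]
            have hf : (getDescents perm).filter (fun d => decide (((jn + 1 : Nat) : Int) ≤ d)) = [] := by
              rw [List.filter_eq_nil_iff]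
              intro d hd
              rw [hsplit] at hd
              simp only [List.append_nil] at hd
              have := hL d hd
              simp only [decide_eq_true_eq]
              push_cast
              omega
            rw [hf]; rfl
          simp [hlead]
        · rw [if_neg hj2]
      rw [hok, if_pos rfl]
      rw [pvStepA]
      have hDlen' : (getDescents perm).length = L.length := by simpa using hDlen
      have hc1 : ¬ ((L.length : Int) < ((getDescents perm).length : Int)) := by
        rw [hDlen']
        omega
      have hc2 : ((getDescents perm).length : Int) ≤ (L.length : Int) := by
        rw [hDlen']
      simp [hc1, hc2]
  | cons r R' =>
    have hp : (L ++ r :: R').Pairwise (· < ·) := hsplit ▸ pv_D_pairwise perm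
    have hpr : ∀ d ∈ R', r < d := (List.pairwise_cons.mp (List.pairwise_append.mp hp).2.1).1
    have hr0 : PySem.List.pyGetD (getDescents perm) ((L.length : Nat) : Int) 0 = r := by
      rw [PySem.List.pyGetD_natCast, hsplit, List.getD_eq_getElem?_getD,
        List.getElem?_append_right (Nat.le_refl _)]
      simp
    have hc1lt : (L.length : Int) < ((getDescents perm).length : Int) := by
      rw [hDlen]; simp only [List.length_cons]; push_cast; omega
    have hne : (getDescents perm).isEmpty = false := by rw [hsplit]; simp
    have hrmem : r ∈ getDescents perm := by rw [hsplit]; simp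
    have hrD := (pv_mem_D perm r).mp hrmem
    have hrge : (jn : Int) ≤ r := hR r List.mem_cons_self
    by_cases hreq : r = (jn : Int)
    · subst hreq
      have hj2 : jn + 1 < perm.length := by omega
      refine ⟨L ++ [(jn : Int)], R', by rw [hsplit]; simp, ?_, ?_, ?_⟩
      · intro d hd
        rcases List.mem_append.mp hd with hd | hd
        · have := hL d hd; push_cast; omega
        · simp only [List.mem_singleton] at hd; subst hd; push_cast; omega
      · intro d hd
        have := hpr d hd
        push_cast
        omega
      · have hok : pvOk perm jn = true := by
          unfold pvOk
          rw [if_pos hj2]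
          have := hrD.2.2
          rw [pv_pyGetD_toNat perm _ (by omega), pv_pyGetD_toNat' perm _ (by omega)] at this
          simp only [Int.toNat_natCast] at this
          simp only [List.getD_eq_getElem?_getD] at this
          simp [this]
        rw [hok, if_pos rfl, pvStepA]
        simp only [hne, hc1lt, hr0, decide_true, Bool.and_true, Bool.not_false,
          BEq.rfl, if_true]
        have hlen2 : ((L ++ [((jn : Nat) : Int)]).length : Int) = (L.length : Int) + 1 := by
          simp
        rw [hlen2]
    · have hrgt : (jn : Int) < r := by omega
      have hrub : r < (perm.length : Int) - 1 := hrD.2.1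
      have hj2 : jn + 1 < perm.length := by omega
      refine ⟨L, r :: R', hsplit, ?_, ?_, ?_⟩
      · intro d hd; have := hL d hd; push_cast; omega
      · intro d hd
        rcases List.mem_cons.mp hd with rfl | hd
        · push_cast; omega
        · have := hpr d hd; push_cast; omega
      · -- branch 3 of A's loop body
        have hnjn : ¬ ((jn : Int) = (perm.length : Int) - 1) := by omega
        have hfR : (getDescents perm).filter (fun d => decide (((jn + 1 : Nat) : Int) ≤ d))
            = r :: R' := by
          rw [hsplit, List.filter_append]
          have h1 : L.filter (fun d => decide (((jn + 1 : Nat) : Int) ≤ d)) = [] := by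
            rw [List.filter_eq_nil_iff]
            intro d hd
            have := hL d hd
            simp only [decide_eq_true_eq]
            push_cast
            omega
          have h2 : (r :: R').filter (fun d => decide (((jn + 1 : Nat) : Int) ≤ d)) = r :: R' := by
            rw [List.filter_eq_self]
            intro d hd
            rcases List.mem_cons.mp hd with rfl | hd
            · simp only [decide_eq_true_eq]; push_cast; omega
            · have := hpr d hd
              simp only [decide_eq_true_eq]
              push_cast
              omega
          rw [h1, h2, List.nil_append]
        have hlead : pvLead (perm.drop (jn + 1)) = some (perm.getD (r.toNat + 1) 0) := by
          rw [pv_lead_find perm perm.length (jn + 1) (by omega), hfR]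
          rfl
        have hnd : ¬ (perm.getD (jn + 1) 0 < perm.getD jn 0) := by
          intro hlt
          have hmem : ((jn : Nat) : Int) ∈ getDescents perm := by
            rw [pv_mem_D]
            refine ⟨by omega, by omega, ?_⟩
            rw [pv_pyGetD_toNat perm _ (by omega), pv_pyGetD_toNat' perm _ (by omega)]
            simpa using hlt
          rw [hsplit] at hmem
          rcases List.mem_append.mp hmem with hm | hm
          · have := hL _ hm; omega
          · rcases List.mem_cons.mp hm with he | hm
            · omega
            · have := hpr _ hm; omega
        have hok : pvOk perm jn = decide (perm.getD (jn + 1) 0 ≤ perm.getD (r.toNat + 1) 0) := by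
          unfold pvOk
          rw [if_pos hj2, hlead]
          simp only [List.getD_eq_getElem?_getD] at hnd
          simp [hnd]
        have hg1 : PySem.List.pyGetD perm ((jn : Int) + 1) 0 = perm.getD (jn + 1) 0 := by
          rw [pv_pyGetD_toNat perm _ (by omega)]
          simp
        have hgr : PySem.List.pyGetD perm (r + 1) 0 = perm.getD (r.toNat + 1) 0 :=
          pv_pyGetD_toNat perm r hrD.1
        rw [pvStepA]
        simp only [hne, hc1lt, hr0, hg1, hgr, Bool.false_or, decide_true,
          Bool.and_true, Bool.not_false]
        rw [hok]
        have hbeq : (r == (jn : Int)) = false := by simp [hreq]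
        simp [hbeq, hnjn]
        have hlenle : ¬ ((getDescents perm).length ≤ L.length) := by omega
        by_cases hcmp : perm[jn + 1]?.getD 0 ≤ perm[r.toNat + 1]?.getD 0 <;>
          simp [hlenle, hcmp]

theorem pv_A_loop (perm : List Int) : ∀ (k jn : Nat) (ins L R : List Int),
    perm.length = jn + k →
    getDescents perm = L ++ R →
    (∀ d ∈ L, d < (jn : Int)) →
    (∀ d ∈ R, (jn : Int) ≤ d) →
    ((PySem.List.pyRange (jn : Int) (perm.length : Int) 1).foldl
        (pvStepA perm (getDescents perm)) (ins, (L.length : Int))).1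
      = ins ++ (PySem.List.pyRange (jn : Int) (perm.length : Int) 1).filter
          (fun i => pvOk perm i.toNat) := by
  intro k
  induction k with
  | zero =>
    intro jn ins L R hlen _ _ _
    rw [PySem.List.pyRange_one_eq_nil (by omega)]
    simp
  | succ k ih =>
    intro jn ins L R hlen hsplit hL hR
    rw [PySem.List.pyRange_one_cons (by omega : (jn : Int) < (perm.length : Int))]
    simp only [List.foldl_cons, List.filter_cons]
    obtain ⟨L', R', hsplit', hL', hR', hstep⟩ :=
      pv_stepA_eval perm jn ins L R (by omega) hsplit hL hR
    rw [hstep]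
    rw [show (jn : Int) + 1 = ((jn + 1 : Nat) : Int) by push_cast; ring]
    rw [ih (jn + 1) _ L' R' (by omega) hsplit' hL' hR']
    have ht : ((jn : Nat) : Int).toNat = jn := by omega
    by_cases hk : pvOk perm jn <;> simp [hk, ht]

theorem pv_stepB_state (perm : List Int) (res : List Int) (jn : Nat) (h : jn < perm.length) :
    pvStepB perm (res, (pvLead (perm.drop (jn + 1))).isSome, (pvLead (perm.drop (jn + 1))).getD 0) (jn : Int)
      = ((if pvOk perm jn then res ++ [(jn : Int)] else res),
         (pvLead (perm.drop jn)).isSome, (pvLead (perm.drop jn)).getD 0) := by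
  have hg0 : PySem.List.pyGetD perm (jn : Int) 0 = perm.getD jn 0 := by
    rw [PySem.List.pyGetD_natCast]
  have hg1 : PySem.List.pyGetD perm ((jn : Int) + 1) 0 = perm.getD (jn + 1) 0 := by
    rw [show ((jn : Int) + 1) = ((jn + 1 : Nat) : Int) by push_cast; ring,
      PySem.List.pyGetD_natCast]
  by_cases h2 : jn + 1 < perm.length
  · have hgd : perm.getD (jn + 1) 0 = perm[jn + 1]?.getD 0 := List.getD_eq_getElem?_getD ..
    have hgd0 : perm.getD jn 0 = perm[jn]?.getD 0 := List.getD_eq_getElem?_getD ..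
    have hd : perm.drop jn = perm.getD jn 0 :: (perm.getD (jn + 1) 0 :: perm.drop (jn + 2)) := by
      rw [pv_drop_cons perm jn h, pv_drop_cons perm (jn + 1) h2]
    have hd1 : perm.drop (jn + 1) = perm.getD (jn + 1) 0 :: perm.drop (jn + 2) :=
      pv_drop_cons perm (jn + 1) h2
    have hlt : (jn : Int) < (perm.length : Int) - 1 := by omega
    by_cases hD : perm.getD (jn + 1) 0 < perm.getD jn 0
    · rw [pvStepB]
      simp only [hg0, hg1, hd, hd1, pvLead_cons_cons, pvOk]
      rw [hgd, hgd0] at hD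
      have hb : perm[jn + 1] = perm[jn + 1]?.getD 0 := by rw [List.getElem?_eq_getElem h2]; rfl
      simp only [hlt, h2]
      simp [hD]
    · rw [pvStepB]
      simp only [hg0, hg1, hd, hd1, pvLead_cons_cons, pvOk]
      rw [hgd, hgd0] at hD
      have hb : perm[jn + 1] = perm[jn + 1]?.getD 0 := by rw [List.getElem?_eq_getElem h2]; rfl
      cases hc : pvLead (perm.getD (jn + 1) 0 :: perm.drop (jn + 2)) <;>
        · simp only [hlt, h2]
          try simp only [hb]
          simp [hD]
  · have hlen : jn + 1 = perm.length := by omega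
    have hd : perm.drop jn = [perm.getD jn 0] := by
      rw [pv_drop_cons perm jn h, hlen, List.drop_length]
    have hd1 : perm.drop (jn + 1) = [] := by rw [hlen, List.drop_length]
    have hlt : ¬ ((jn : Int) < (perm.length : Int) - 1) := by omega
    rw [pvStepB]
    simp only [hg0, hg1, hd, hd1, pvOk]
    simp [hlt, h2, pvLead]

theorem pv_B_loop (perm : List Int) (jn : Nat) (res : List Int) (h : jn < perm.length) :
    ((PySem.List.pyRange (jn : Int) (-1) (-1)).foldl (pvStepB perm)
        (res, (pvLead (perm.drop (jn + 1))).isSome, (pvLead (perm.drop (jn + 1))).getD 0)).1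
      = res ++ (PySem.List.pyRange (jn : Int) (-1) (-1)).filter (fun i => pvOk perm i.toNat) := by
  induction jn generalizing res with
  | zero =>
    have hr : PySem.List.pyRange ((0 : Nat) : Int) (-1) (-1) = [((0 : Nat) : Int)] := by
      show PySem.List.pyRange 0 (-1) (-1) = [(0 : Int)]
      rw [PySem.List.pyRange_neg_one_cons (by omega : (-1 : Int) < 0)]
      norm_num [PySem.List.pyRange_neg_one_eq_nil]
    rw [hr]
    simp only [List.foldl_cons, List.foldl_nil, List.filter_cons, List.filter_nil]
    rw [pv_stepB_state perm res 0 h]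
    by_cases hk : pvOk perm 0 <;> simp [hk]
  | succ k ih =>
    rw [PySem.List.pyRange_neg_one_cons (by omega : (-1 : Int) < ((k + 1 : Nat) : Int))]
    rw [show (((k + 1 : Nat) : Int) - 1) = ((k : Nat) : Int) by push_cast; ring]
    simp only [List.foldl_cons, List.filter_cons]
    rw [pv_stepB_state perm res (k + 1) h, ih _ (by omega)]

    by_cases hk : pvOk perm (k + 1) <;> simp [hk]

theorem pv_B_eq_filter (perm : List Int) :
    getInsertionPoints_alt perm =
      (PySem.List.pyRange 0 (perm.length : Int) 1).filter (fun i => pvOk perm i.toNat) := by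
  unfold getInsertionPoints_alt
  rcases perm with _ | ⟨x, xs⟩
  · simp [
      PySem.List.pyRange_one_eq_nil (by omega : (0 : Int) ≤ 0)]
  · set p := x :: xs with hp
    have hplen : p.length = xs.length + 1 := by simp [hp]
    have hcast : ((p.length : Int) - 1) = ((xs.length : Nat) : Int) := by
      rw [hplen]; push_cast; ring
    have hstate : pvLead (p.drop (xs.length + 1)) = none := by
      rw [show xs.length + 1 = p.length by omega, List.drop_length]; rfl
    have hmain := pv_B_loop p xs.length [] (by omega)
    rw [hstate] at hmain
    simp only [Option.isSome_none, Option.getD_none] at hmain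
    rw [hcast, hmain]
    rw [PySem.List.pyRange_neg_one_eq_reverse]
    rw [show ((-1 : Int) + 1) = 0 by ring,
      show (((xs.length : Nat) : Int) + 1) = (p.length : Int) by rw [hplen]; push_cast; ring]
    simp

theorem pv_A_eq_filter (perm : List Int) :
    getInsertionPoints perm =
      (PySem.List.pyRange 0 (perm.length : Int) 1).filter (fun i => pvOk perm i.toNat) := by
  unfold getInsertionPoints
  have h := pv_A_loop perm perm.length 0 [] [] (getDescents perm)
    (by omega) (by simp) (by simp) (by intro d hd; exact ((pv_mem_D perm d).mp hd).1)
  simpa using h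

-- ===== VERDICT (by name: the statement is the Claim_ definition above) =====
theorem getInsertionPoints_spec : Claim_equal_getInsertionPoints := by
  intro perm _
  unfold Spec_getInsertionPoints
  rw [pv_A_eq_filter, pv_B_eq_filter]
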